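-- pv_equiv track=rewrite | github.com/adrianohermida/newgit | ai-core/api/server.py | _iter_local_runtime_fallback_models
-- ===== SOURCE A (Python) =====
-- from typing import Any, Mapping
--
-- def _get_clean(value: Any) -> str | None:
--     if value is None:
--         return None
--     text = str(value).strip()
--     if not text:
--         return None
--     if (text.startswith('"') and text.endswith('"')) or (text.startswith("'") and text.endswith("'")):
--         return text[1:-1].strip() or None
--     return text
--
-- def _pick_local_low_resource_model(current_model: str | None, available_models: list[str]) -> str | None:
--     normalized_current = (_get_clean(current_model) or '').lower()
--     priorities = [
--         'qwen3.5:cloud',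
--         'qwen3.5:4b',
--         'qwen3:4b',
--         'qwen3:8b',
--         'llama3.2:latest',
--         'llama3.1:latest',
--         'llama2:latest',
--     ]
--     for preferred in priorities:
--         for candidate in available_models:
--             normalized_candidate = _get_clean(candidate).lower()
--             if normalized_candidate == preferred and normalized_candidate != normalized_current:
--                 return candidate
--     for candidate in available_models:
--         normalized_candidate = _get_clean(candidate).lower()
--         if normalized_candidate and normalized_candidate != normalized_current and 'gemma4' not in normalized_candidate:
--             return candidate
--     return None
--
-- def _iter_local_runtime_fallback_models(current_model: str | None, available_models: list[str]) -> list[str]: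
--     normalized_current = _get_clean(current_model).lower()
--     ordered: list[str] = []
--     first = _pick_local_low_resource_model(current_model, available_models)
--     if first:
--       ordered.append(first)
--     for candidate in available_models:
--         normalized_candidate = _get_clean(candidate).lower()
--         if not normalized_candidate or normalized_candidate == normalized_current or candidate in ordered:
--             continue
--         ordered.append(candidate)
--     return ordered
-- ===== SOURCE B (Python) =====
-- _PRIORITIES = [
--     'qwen3.5:cloud',
--     'qwen3.5:4b',
--     'qwen3:4b',
--     'qwen3:8b',
--     'llama3.2:latest',
--     'llama3.1:latest',
--     'llama2:latest',
-- ]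
--
--
-- def _clean(value):
--     if value is None:
--         return None
--     text = str(value).strip()
--     if not text:
--         return None
--     if (text.startswith('"') and text.endswith('"')) or (text.startswith("'") and text.endswith("'")):
--         return text[1:-1].strip() or None
--     return text
--
--
-- def _iter_local_runtime_fallback_models(current_model, available_models):
--     cur = _clean(current_model).lower()
--     first_by_norm = {}
--     uniques = []
--     for cand in available_models:
--         norm = _clean(cand).lower()
--         if norm == cur:
--             continue
--         first_by_norm.setdefault(norm, cand)
--         if cand not in uniques:
--             uniques.append(cand)
--     pick = next((first_by_norm[p] for p in _PRIORITIES if p in first_by_norm), None)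
--     if pick is None:
--         pick = next((c for c in uniques if 'gemma4' not in _clean(c).lower()), None)
--     if pick is None:
--         return uniques
--     return [pick] + [c for c in uniques if c != pick]
-- ===== Notes on version B (the rewrite author's own statement) =====
-- stated objective: alternative
-- what changed: A's nested priorities-by-candidates scan plus a separate fallback scan and a dedup loop with a pick computed up front are replaced by one pass over available_models that builds a first-occurrence-per-normalized-name dict and the deduplicated list together, after which the front pick is derived from dict lookups over the priority list (or the first non-gemma4 unique); dedup on raw strings, the pick-first assembly and the priority/first-occurrence tie-breaking are preserved.
import Mathlib
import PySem

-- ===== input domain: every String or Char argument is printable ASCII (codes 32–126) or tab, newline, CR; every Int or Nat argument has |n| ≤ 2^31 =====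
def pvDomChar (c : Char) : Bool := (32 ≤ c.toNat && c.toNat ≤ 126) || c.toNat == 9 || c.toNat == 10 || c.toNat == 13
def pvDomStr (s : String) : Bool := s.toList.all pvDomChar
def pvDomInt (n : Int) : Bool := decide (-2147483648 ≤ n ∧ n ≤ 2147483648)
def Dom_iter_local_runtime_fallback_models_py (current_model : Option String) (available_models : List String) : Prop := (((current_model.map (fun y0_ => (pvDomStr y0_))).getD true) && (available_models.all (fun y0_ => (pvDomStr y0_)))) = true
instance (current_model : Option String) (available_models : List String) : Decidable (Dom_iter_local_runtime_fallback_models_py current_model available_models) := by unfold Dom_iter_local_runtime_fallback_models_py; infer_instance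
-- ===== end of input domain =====

-- B replaces A's nested priorities×candidates scan and its separate fallback pass by one pass that
-- builds a first-occurrence-by-normalized-name dict and the deduplicated list together (alternative
-- decomposition, same cost); equivalence is claimed on Pre_, the inputs where the Python returns
-- (outside Pre_ both Pythons raise AttributeError).

-- ===== PORT A =====
-- _get_clean (A's helper)
def getClean (value : Option String) : Option String :=
  match value with
  | none => none
  | some v =>
    let text := PySem.Str.strip v
    if text == "" then none
    else if (PySem.Str.startswith text "\"" && PySem.Str.endswith text "\"") ||
            (PySem.Str.startswith text "'" && PySem.Str.endswith text "'") then
      let inner := PySem.Str.strip (PySem.Str.slice text (some 1) (some (-1)))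
      if inner == "" then none else some inner
    else some text

def pyPriorities : List String :=
  ["qwen3.5:cloud", "qwen3.5:4b", "qwen3:4b", "qwen3:8b",
   "llama3.2:latest", "llama3.1:latest", "llama2:latest"]

-- `_get_clean(candidate).lower()`: Python raises AttributeError when _get_clean gives None;
-- the port reads "" there and Pre_ excludes those inputs.
def normOf (c : String) : String := PySem.Str.lower ((getClean (some c)).getD "")

-- loop bodies of _pick_local_low_resource_model (early `return` ported as an Option
-- accumulator that keeps the first hit)
def aInnerStep (normalized_current preferred : String) (acc : Option String) (candidate : String) : Option String :=
  match acc with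
  | some r => some r
  | none =>
    let nc := normOf candidate
    if nc == preferred && nc != normalized_current then some candidate else none

def aFallbackStep (normalized_current : String) (acc : Option String) (candidate : String) : Option String :=
  match acc with
  | some r => some r
  | none =>
    let nc := normOf candidate
    if nc != "" && nc != normalized_current && !PySem.Str.isIn "gemma4" nc then some candidate
    else none

def pickLocalLowResourceModel (current_model : Option String) (available_models : List String) : Option String :=
  let normalized_current := PySem.Str.lower ((getClean current_model).getD "")
  let prio := pyPriorities.foldl (fun acc preferred =>
      match acc with
      | some r => some r
      | none => available_models.foldl (aInnerStep normalized_current preferred) none) none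
  match prio with
  | some r => some r
  | none => available_models.foldl (aFallbackStep normalized_current) none

-- the body of the `ordered`-building loop of _iter_local_runtime_fallback_models
def aOrderedStep (normalized_current : String) (ordered : List String) (candidate : String) : List String :=
  let nc := normOf candidate
  if nc == "" || nc == normalized_current || ordered.contains candidate then ordered
  else ordered ++ [candidate]

def iter_local_runtime_fallback_models_py (current_model : Option String) (available_models : List String) : List String :=
  match getClean current_model with
  | none => []   -- Python raises AttributeError here; Pre_ excludes these inputs
  | some cm =>
    let normalized_current := PySem.Str.lower cm
    let first := pickLocalLowResourceModel current_model available_models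
    let ordered : List String :=
      match first with
      | some f => if f != "" then [f] else []   -- `if first:` truthiness
      | none => []
    available_models.foldl (aOrderedStep normalized_current) ordered

-- ===== PORT B =====
-- _clean (B's own copy of the cleaning helper in Source B)
def bClean (value : Option String) : Option String :=
  match value with
  | none => none
  | some v =>
    let text := PySem.Str.strip v
    if text == "" then none
    else if (PySem.Str.startswith text "\"" && PySem.Str.endswith text "\"") ||
            (PySem.Str.startswith text "'" && PySem.Str.endswith text "'") then
      let inner := PySem.Str.strip (PySem.Str.slice text (some 1) (some (-1)))
      if inner == "" then none else some inner
    else some text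

def bPriorities : List String :=
  ["qwen3.5:cloud", "qwen3.5:4b", "qwen3:4b", "qwen3:8b",
   "llama3.2:latest", "llama3.1:latest", "llama2:latest"]

-- `_clean(cand).lower()` — raises in Python when _clean is None; "" here, Pre_ excludes
def bNorm (c : String) : String := PySem.Str.lower ((bClean (some c)).getD "")

-- the body of Source B's single loop: dict of first candidate per normalized name + dedup list
def bStep (cur : String) (st : PySem.Dict String String × List String) (cand : String) :
    PySem.Dict String String × List String :=
  let norm := bNorm cand
  if norm == cur then st
  else
    let d := st.1.setdefault norm cand
    let u := if st.2.contains cand then st.2 else st.2 ++ [cand]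
    (d, u)

-- one step of `next((first_by_norm[p] for p in _PRIORITIES if p in first_by_norm), None)`
def bPrioStep (d : PySem.Dict String String) (acc : Option String) (p : String) : Option String :=
  match acc with
  | some x => some x
  | none => if d.contains p then d.get? p else none

def iter_local_runtime_fallback_models_py_alt (current_model : Option String) (available_models : List String) : List String :=
  match bClean current_model with
  | none => []   -- Python raises AttributeError here; Pre_ excludes these inputs
  | some cm =>
    let cur := PySem.Str.lower cm
    let st := available_models.foldl (bStep cur) (PySem.Dict.empty, [])
    let d := st.1
    let uniques := st.2
    let pick0 := bPriorities.foldl (bPrioStep d) none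
    let pick := match pick0 with
      | some x => some x
      | none => uniques.find? (fun c => !PySem.Str.isIn "gemma4" (bNorm c))
    match pick with
    | none => uniques
    | some p => p :: uniques.filter (fun c => c != p)

-- ===== PRECONDITION & SPEC =====
-- Pre_ excludes exactly the inputs on which the Python A (and B) raises AttributeError:
-- a current_model that _get_clean maps to None, or any candidate that _get_clean maps to None.
def Pre_iter_local_runtime_fallback_models_py (current_model : Option String) (available_models : List String) : Prop :=
  getClean current_model ≠ none ∧ ∀ c ∈ available_models, getClean (some c) ≠ none
instance (current_model : Option String) (available_models : List String) : Decidable (Pre_iter_local_runtime_fallback_models_py current_model available_models) := by unfold Pre_iter_local_runtime_fallback_models_py; infer_instance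

def pvWitness_iter_local_runtime_fallback_models_py : Option String × List String :=
  (some "qwen3:4b", ["qwen3:8b", "gemma4:2b", "qwen3:8b", "QWEN3:4B", " \"llama2:latest\" "])

def Spec_iter_local_runtime_fallback_models_py (current_model : Option String) (available_models : List String) (out : List String) : Prop := out = iter_local_runtime_fallback_models_py_alt current_model available_models
instance (current_model : Option String) (available_models : List String) (out : List String) : Decidable (Spec_iter_local_runtime_fallback_models_py current_model available_models out) := by unfold Spec_iter_local_runtime_fallback_models_py; infer_instance

-- ===== CLAIM (what is proved, stated in full; the proofs are below) =====
def Claim_equal_iter_local_runtime_fallback_models_py : Prop := ∀ (current_model : Option String) (available_models : List String), Dom_iter_local_runtime_fallback_models_py current_model available_models → Pre_iter_local_runtime_fallback_models_py current_model available_models → Spec_iter_local_runtime_fallback_models_py current_model available_models (iter_local_runtime_fallback_models_py current_model available_models)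

-- ===== LEMMAS AND PROOFS =====

-- find? predicates of the scans, and the "first priority with a hit" search in recursive form
def prioPred (cur p : String) (c : String) : Bool := normOf c == p && normOf c != cur
def fbPredA (cur : String) (c : String) : Bool :=
  normOf c != "" && normOf c != cur && !PySem.Str.isIn "gemma4" (normOf c)
def firstHit (cur : String) (l : List String) : List String → Option String
  | [] => none
  | p :: ps => match l.find? (prioPred cur p) with
    | some c => some c
    | none => firstHit cur l ps
-- the uniques-building component of bStep, in isolation
def uStep (cur : String) (u : List String) (c : String) : List String :=
  if bNorm c == cur then u else if u.contains c then u else u ++ [c]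

theorem bClean_eq : bClean = getClean := rfl
theorem bNorm_eq : bNorm = normOf := rfl

theorem getClean_some_ne_empty (v : Option String) (t : String) (h : getClean v = some t) : t ≠ "" := by
  intro he
  subst he
  unfold getClean at h
  cases v with
  | none => simp at h
  | some s =>
    simp only [] at h
    split at h
    · simp at h
    · split at h
      · split at h <;> simp_all
      · simp_all

theorem lower_ne_empty (t : String) (h : t ≠ "") : PySem.Str.lower t ≠ "" := by
  intro he
  apply h
  rw [← String.toList_eq_nil_iff] at he ⊢
  have h2 : (PySem.Str.lower t).toList = PySem.Chars.lower t.toList := by simp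
  rw [h2] at he
  simpa [PySem.Chars.lower] using he

theorem normOf_ne_empty (c : String) (h : getClean (some c) ≠ none) : normOf c ≠ "" := by
  obtain ⟨t, ht⟩ := Option.ne_none_iff_exists'.mp h
  unfold normOf
  rw [ht]
  exact lower_ne_empty t (getClean_some_ne_empty _ _ ht)

theorem find?_congr_mem (p q : String → Bool) (l : List String) (h : ∀ c ∈ l, p c = q c) :
    l.find? p = l.find? q := by
  induction l with
  | nil => rfl
  | cons c t ih =>
    simp only [List.find?_cons, h c (by simp)]
    split
    · rfl
    · exact ih (fun x hx => h x (by simp [hx]))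

-- A's inner priority scan is a find?
theorem foldl_aInnerStep (cur p : String) (l : List String) (a : Option String) :
    l.foldl (aInnerStep cur p) a
    = (match a with | some r => some r | none => l.find? (prioPred cur p)) := by
  induction l generalizing a with
  | nil => cases a <;> rfl
  | cons c t ih =>
    cases a with
    | some r => rw [List.foldl_cons]; exact ih (some r)
    | none =>
      rw [List.foldl_cons]
      have hs : aInnerStep cur p none c = if prioPred cur p c then some c else none := rfl
      rw [hs]
      by_cases h : prioPred cur p c <;> simp [h, ih]

-- A's fallback scan is a find?
theorem foldl_aFallbackStep (cur : String) (l : List String) (a : Option String) :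
    l.foldl (aFallbackStep cur) a
    = (match a with | some r => some r | none => l.find? (fbPredA cur)) := by
  induction l generalizing a with
  | nil => cases a <;> rfl
  | cons c t ih =>
    cases a with
    | some r => rw [List.foldl_cons]; exact ih (some r)
    | none =>
      rw [List.foldl_cons]
      have hs : aFallbackStep cur none c = if fbPredA cur c then some c else none := rfl
      rw [hs]
      by_cases h : fbPredA cur c <;> simp [h, ih]

-- characterization of A's pick
theorem pickA_eq (current_model : Option String) (l : List String) :
    pickLocalLowResourceModel current_model l
    = (match firstHit (PySem.Str.lower ((getClean current_model).getD "")) l pyPriorities with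
       | some r => some r
       | none => l.find? (fbPredA (PySem.Str.lower ((getClean current_model).getD "")))) := by
  simp only [pickLocalLowResourceModel]
  set cur := PySem.Str.lower ((getClean current_model).getD "") with hcur
  have houter : ∀ (ps : List String) (a : Option String),
      ps.foldl (fun acc preferred => match acc with
        | some r => some r
        | none => l.foldl (aInnerStep cur preferred) none) a
      = (match a with | some r => some r | none => firstHit cur l ps) := by
    intro ps
    induction ps with
    | nil => intro a; cases a <;> rfl
    | cons p ps ih =>
      intro a
      cases a with
      | some r => rw [List.foldl_cons]; exact ih (some r)
      | none =>
        rw [List.foldl_cons]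
        have hs : (match (none : Option String) with
              | some r => some r
              | none => l.foldl (aInnerStep cur p) none) = l.foldl (aInnerStep cur p) none := rfl
        rw [hs, foldl_aInnerStep]
        simp only [firstHit]
        cases h : l.find? (prioPred cur p) with
        | some c => exact ih (some c)
        | none => exact ih none
  rw [houter pyPriorities none]
  cases firstHit cur l pyPriorities with
  | some r => rfl
  | none => exact foldl_aFallbackStep cur l none

theorem firstHit_mem (cur : String) (l ps : List String) (f : String)
    (h : firstHit cur l ps = some f) : f ∈ l := by
  induction ps with
  | nil => simp [firstHit] at h
  | cons p ps ih =>
    simp only [firstHit] at h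
    cases hf : l.find? (prioPred cur p) with
    | some c =>
      rw [hf] at h
      exact (Option.some_injective _ h) ▸ List.mem_of_find?_eq_some hf
    | none => rw [hf] at h; exact ih h

-- B's loop: the dict component answers get? like A's inner scan
theorem b_fold_fst_get? (cur p : String) (l : List String) (d : PySem.Dict String String) (u : List String) :
    ((l.foldl (bStep cur) (d, u)).1).get? p
    = (match d.get? p with
       | some v => some v
       | none => l.find? (fun c => bNorm c != cur && bNorm c == p)) := by
  induction l generalizing d u with
  | nil => cases h : d.get? p <;> simp [h]
  | cons c t ih =>
    rw [List.foldl_cons]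
    by_cases hc : bNorm c == cur
    · rw [show bStep cur (d, u) c = (d, u) from by simp [bStep, hc]]
      rw [ih, List.find?_cons]
      have heq : bNorm c = cur := by simpa using hc
      have hpr : (bNorm c != cur && bNorm c == p) = false := by simp [heq]
      rw [hpr]
    · rw [show bStep cur (d, u) c
          = (d.setdefault (bNorm c) c, if u.contains c then u else u ++ [c]) from by simp [bStep, hc]]
      by_cases hp : p = bNorm c
      · subst hp
        rw [ih, PySem.Dict.get?_setdefault_self, List.find?_cons]
        have hne : bNorm c ≠ cur := by simpa using hc
        have hpr : (bNorm c != cur && bNorm c == bNorm c) = true := by simp [hne]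
        rw [hpr]
        cases hd : d.get? (bNorm c) <;> simp [hd]
      · rw [ih, PySem.Dict.get?_setdefault_of_ne d c hp, List.find?_cons]
        have hpr : (bNorm c != cur && bNorm c == p) = false := by
          have : (bNorm c == p) = false := by
            simpa using fun hh => hp (by simp_all)
          simp [this]
        rw [hpr]

-- B's loop: the list component is the uniques fold
theorem b_fold_snd (cur : String) (l : List String) (d : PySem.Dict String String) (u : List String) :
    (l.foldl (bStep cur) (d, u)).2 = l.foldl (uStep cur) u := by
  induction l generalizing d u with
  | nil => rfl
  | cons c t ih =>
    rw [List.foldl_cons, List.foldl_cons]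
    by_cases hc : bNorm c == cur
    · rw [show bStep cur (d, u) c = (d, u) from by simp [bStep, hc],
          show uStep cur u c = u from by simp [uStep, hc]]
      exact ih d u
    · rw [show bStep cur (d, u) c
          = (d.setdefault (bNorm c) c, if u.contains c then u else u ++ [c]) from by simp [bStep, hc],
          show uStep cur u c = if u.contains c then u else u ++ [c] from by simp [uStep, hc]]
      by_cases hu : u.contains c <;> simp only [hu, Bool.false_eq_true, ite_true, ite_false] <;> exact ih _ _

-- a value-only find? over B's uniques list is a find? over the raw candidate list
theorem find?_uStep (cur : String) (P : String → Bool) (l u : List String) :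
    (l.foldl (uStep cur) u).find? P
    = (match u.find? P with
       | some r => some r
       | none => l.find? (fun c => bNorm c != cur && P c && !u.contains c)) := by
  induction l generalizing u with
  | nil => cases h : u.find? P <;> simp [h]
  | cons c t ih =>
    rw [List.foldl_cons]
    by_cases hc : bNorm c == cur
    · rw [show uStep cur u c = u from by simp [uStep, hc], ih]
      conv_rhs => rw [List.find?_cons]
      have heq : bNorm c = cur := by simpa using hc
      have hpr : (bNorm c != cur && P c && !u.contains c) = false := by simp [heq]
      rw [hpr]
    · have hne : bNorm c ≠ cur := by simpa using hc
      by_cases hu : u.contains c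
      · have hmu : c ∈ u := by simpa [List.contains_eq_mem] using hu
        rw [show uStep cur u c = u from by simp [uStep, hc, hmu], ih]
        conv_rhs => rw [List.find?_cons]
        have hpr : (bNorm c != cur && P c && !u.contains c) = false := by simp [hmu]
        rw [hpr]
      · have hmu : c ∉ u := by simpa [List.contains_eq_mem] using hu
        rw [show uStep cur u c = u ++ [c] from by simp [uStep, hc, hmu], ih]
        conv_rhs => rw [List.find?_cons]
        by_cases hP : P c
        · have hpr : (bNorm c != cur && P c && !u.contains c) = true := by simp [hne, hP, hmu]
          have hfu : List.find? P (u ++ [c]) = (List.find? P u).or (some c) := by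
            rw [List.find?_append]; simp [hP]
          rw [hpr, hfu]
          cases hup : List.find? P u <;> simp [hup]
        · have hpr : (bNorm c != cur && P c && !u.contains c) = false := by simp [hP]
          have hfu : List.find? P (u ++ [c]) = List.find? P u := by
            rw [List.find?_append]; simp [hP]
          have hpred : (fun e => bNorm e != cur && P e && !(u ++ [c]).contains e)
              = (fun e => bNorm e != cur && P e && !u.contains e) := by
            funext e
            by_cases he : e = c
            · subst he; simp [hP]
            · have h2 : (u ++ [c]).contains e = u.contains e := by
                simp [List.contains_eq_mem, List.mem_append, he]
              rw [h2]
          rw [hpr, hfu, hpred]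

-- A's ordered loop, started from [f], is the bare loop's result with f pulled to the front
theorem foldl_aOrderedStep_head (cur f : String) (l X : List String) :
    l.foldl (aOrderedStep cur) (f :: X.filter (fun x => x != f))
    = f :: (l.foldl (aOrderedStep cur) X).filter (fun x => x != f) := by
  induction l generalizing X with
  | nil => rfl
  | cons c t ih =>
    rw [List.foldl_cons, List.foldl_cons]
    by_cases h0 : normOf c == ""
    · rw [show aOrderedStep cur (f :: X.filter (fun x => x != f)) c
            = f :: X.filter (fun x => x != f) from by simp [aOrderedStep, h0],
          show aOrderedStep cur X c = X from by simp [aOrderedStep, h0]]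
      exact ih X
    · by_cases h1 : normOf c == cur
      · rw [show aOrderedStep cur (f :: X.filter (fun x => x != f)) c
              = f :: X.filter (fun x => x != f) from by simp [aOrderedStep, h1],
            show aOrderedStep cur X c = X from by simp [aOrderedStep, h1]]
        exact ih X
      · by_cases hcf : c = f
        · subst hcf
          rw [show aOrderedStep cur (c :: X.filter (fun x => x != c)) c
                = c :: X.filter (fun x => x != c) from by
              simp [aOrderedStep, List.contains_eq_mem]]
          by_cases hXc : X.contains c
          · have hmX : c ∈ X := by simpa [List.contains_eq_mem] using hXc
            rw [show aOrderedStep cur X c = X from by simp [aOrderedStep, h0, h1, hmX]]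
            exact ih X
          · have hmX : c ∉ X := by simpa [List.contains_eq_mem] using hXc
            rw [show aOrderedStep cur X c = X ++ [c] from by simp [aOrderedStep, h0, h1, hmX]]
            have hfil : (X ++ [c]).filter (fun x => x != c) = X.filter (fun x => x != c) := by
              simp [List.filter_append]
            calc t.foldl (aOrderedStep cur) (c :: X.filter (fun x => x != c))
                = t.foldl (aOrderedStep cur) (c :: (X ++ [c]).filter (fun x => x != c)) := by rw [hfil]
              _ = c :: (t.foldl (aOrderedStep cur) (X ++ [c])).filter (fun x => x != c) := ih (X ++ [c])
        · have hcontL : (f :: X.filter (fun x => x != f)).contains c = X.contains c := by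
            simp [List.contains_eq_mem, List.mem_filter, hcf]
          by_cases hXc : X.contains c
          · have hmX : c ∈ X := by simpa [List.contains_eq_mem] using hXc
            rw [show aOrderedStep cur (f :: X.filter (fun x => x != f)) c
                  = f :: X.filter (fun x => x != f) from by
                simp [aOrderedStep, h0, h1, hcf, hmX],
              show aOrderedStep cur X c = X from by simp [aOrderedStep, h0, h1, hmX]]
            exact ih X
          · have hmX : c ∉ X := by simpa [List.contains_eq_mem] using hXc
            rw [show aOrderedStep cur (f :: X.filter (fun x => x != f)) c
                  = f :: (X.filter (fun x => x != f) ++ [c]) from by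
                simp [aOrderedStep, h0, h1, hcf, hmX],
              show aOrderedStep cur X c = X ++ [c] from by simp [aOrderedStep, h0, h1, hmX]]
            have hfil : X.filter (fun x => x != f) ++ [c] = (X ++ [c]).filter (fun x => x != f) := by
              simp [List.filter_append, hcf]
            rw [hfil]
            exact ih (X ++ [c])

-- B's priority lookup over its dict is A's firstHit search
theorem bPick0_eq (cur : String) (l : List String) (ps : List String) (a : Option String) :
    ps.foldl (bPrioStep ((l.foldl (bStep cur) (PySem.Dict.empty, ([] : List String))).1)) a
    = (match a with | some r => some r | none => firstHit cur l ps) := by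
  induction ps generalizing a with
  | nil => cases a <;> rfl
  | cons p ps ih =>
    cases a with
    | some r => rw [List.foldl_cons]; exact ih (some r)
    | none =>
      rw [List.foldl_cons]
      have hget : ((l.foldl (bStep cur) (PySem.Dict.empty, ([] : List String))).1).get? p
          = l.find? (prioPred cur p) := by
        rw [b_fold_fst_get?]
        simp only [PySem.Dict.get?_empty]
        exact find?_congr_mem _ _ l (fun c _ => by
          simp [bNorm_eq, prioPred, Bool.and_comm])
      have hs : bPrioStep ((l.foldl (bStep cur) (PySem.Dict.empty, ([] : List String))).1) none p
          = l.find? (prioPred cur p) := by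
        unfold bPrioStep
        rw [PySem.Dict.contains_eq_isSome_get?, hget]
        cases l.find? (prioPred cur p) <;> simp
      rw [hs]
      simp only [firstHit]
      cases h : l.find? (prioPred cur p) with
      | some c => exact ih (some c)
      | none => exact ih none

-- inside Pre_, A's ordered loop is B's uniques loop
theorem foldl_aOrderedStep_eq_uStep (cur : String) (l : List String)
    (h : ∀ c ∈ l, getClean (some c) ≠ none) (acc : List String) :
    l.foldl (aOrderedStep cur) acc = l.foldl (uStep cur) acc := by
  apply PySem.List.foldl_congr_mem
  intro acc c hcl
  have h0 : (normOf c == "") = false := by simpa using normOf_ne_empty c (h c hcl)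
  unfold aOrderedStep uStep
  rw [bNorm_eq]
  by_cases h1 : normOf c == cur
  · simp [h0, h1]
  · by_cases h2 : acc.contains c <;> simp [h0, h1]

-- inside Pre_, a candidate is a nonempty string
theorem mem_ne_empty (l : List String) (h : ∀ c ∈ l, getClean (some c) ≠ none) (f : String)
    (hf : f ∈ l) : (f != "") = true := by
  have hne : f ≠ "" := by
    intro he
    exact (h f hf) (he ▸ (by decide : getClean (some "") = none))
  simp [hne]

-- ===== VERDICT (by name: the statement is the Claim_ definition above) =====
theorem iter_local_runtime_fallback_models_py_spec : Claim_equal_iter_local_runtime_fallback_models_py := by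
  intro current_model available_models hdom hpre
  obtain ⟨hcur, hall⟩ := hpre
  obtain ⟨cm, hcm⟩ := Option.ne_none_iff_exists'.mp hcur
  unfold Spec_iter_local_runtime_fallback_models_py
  simp only [iter_local_runtime_fallback_models_py, iter_local_runtime_fallback_models_py_alt,
    bClean_eq, hcm]
  have hAo : available_models.foldl (aOrderedStep (PySem.Str.lower cm)) []
      = (available_models.foldl (bStep (PySem.Str.lower cm)) (PySem.Dict.empty, ([] : List String))).2 := by
    rw [b_fold_snd]
    exact foldl_aOrderedStep_eq_uStep _ _ hall []
  have hpickA : pickLocalLowResourceModel current_model available_models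
      = (match firstHit (PySem.Str.lower cm) available_models pyPriorities with
         | some r => some r
         | none => available_models.find? (fbPredA (PySem.Str.lower cm))) := by
    have h := pickA_eq current_model available_models
    rw [hcm] at h
    simpa using h
  have hpick0 : bPriorities.foldl (bPrioStep ((available_models.foldl (bStep (PySem.Str.lower cm))
        (PySem.Dict.empty, ([] : List String))).1)) none
      = firstHit (PySem.Str.lower cm) available_models pyPriorities :=
    bPick0_eq (PySem.Str.lower cm) available_models bPriorities none
  have hfb : ((available_models.foldl (bStep (PySem.Str.lower cm)) (PySem.Dict.empty, ([] : List String))).2).find?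
        (fun c => !PySem.Str.isIn "gemma4" (bNorm c))
      = available_models.find? (fbPredA (PySem.Str.lower cm)) := by
    rw [b_fold_snd, find?_uStep]
    simp only [List.find?_nil]
    refine (find?_congr_mem _ _ available_models (fun c hcl => ?_)).symm
    have h0 : normOf c ≠ "" := normOf_ne_empty c (hall c hcl)
    simp [fbPredA, bNorm_eq, h0, Bool.and_assoc]
  rw [hpickA, hpick0]
  cases hfh : firstHit (PySem.Str.lower cm) available_models pyPriorities with
  | some f =>
    have hmem : f ∈ available_models := firstHit_mem _ _ _ _ hfh
    have hfne := mem_ne_empty available_models hall f hmem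
    show available_models.foldl (aOrderedStep (PySem.Str.lower cm)) (if (f != "") = true then [f] else []) = _
    rw [if_pos hfne]
    have hfilnil : [f] = f :: List.filter (fun x => x != f) [] := rfl
    rw [hfilnil, foldl_aOrderedStep_head, hAo]
  | none =>
    rw [← hfb]
    cases hfb2 : ((available_models.foldl (bStep (PySem.Str.lower cm)) (PySem.Dict.empty, ([] : List String))).2).find?
        (fun c => !PySem.Str.isIn "gemma4" (bNorm c)) with
    | some f =>
      have hmem : f ∈ available_models := by
        rw [hfb] at hfb2
        exact List.mem_of_find?_eq_some hfb2
      have hfne := mem_ne_empty available_models hall f hmem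
      show available_models.foldl (aOrderedStep (PySem.Str.lower cm)) (if (f != "") = true then [f] else []) = _
      rw [if_pos hfne]
      have hfilnil : [f] = f :: List.filter (fun x => x != f) [] := rfl
      rw [hfilnil, foldl_aOrderedStep_head, hAo]
    | none =>
      show available_models.foldl (aOrderedStep (PySem.Str.lower cm)) [] = _
      rw [hAo]
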